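-- pv_equiv track=rewrite | github.com/WebCoder49/British_Informatics_Olympiad | 2018-BIO-2.py | generate_second_ring
-- ===== SOURCE A (Python) =====
-- def generate_second_ring(n):
--     alphabet = list("ABCDEFGHIJKLMNOPQRSTUVWXYZ")
--     result = []
--
--     index = 0
--     while(len(alphabet) > 0):
--         index += (n-1)
--         index %= len(alphabet)  # Acts like circle
--
--         result.append(alphabet[index])
--         alphabet.pop(index)
--
--     return result
-- ===== SOURCE B (Python) =====
-- def generate_second_ring(n):
--     ring = list("ABCDEFGHIJKLMNOPQRSTUVWXYZ")
--     result = []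
--     while ring:
--         k = (n - 1) % len(ring)
--         ring = ring[k:] + ring[:k]   # physically rotate the survivor to the front
--         result.append(ring[0])
--         ring = ring[1:]
--     return result
-- ===== Notes on version B (the rewrite author's own statement) =====
-- stated objective: alternative
-- what changed: B maintains the shrinking ring by physically rotating it (ring[k:]+ring[:k]) so the survivor is always taken from the front, instead of A's accumulated modular index with a positional pop.
import Mathlib
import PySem

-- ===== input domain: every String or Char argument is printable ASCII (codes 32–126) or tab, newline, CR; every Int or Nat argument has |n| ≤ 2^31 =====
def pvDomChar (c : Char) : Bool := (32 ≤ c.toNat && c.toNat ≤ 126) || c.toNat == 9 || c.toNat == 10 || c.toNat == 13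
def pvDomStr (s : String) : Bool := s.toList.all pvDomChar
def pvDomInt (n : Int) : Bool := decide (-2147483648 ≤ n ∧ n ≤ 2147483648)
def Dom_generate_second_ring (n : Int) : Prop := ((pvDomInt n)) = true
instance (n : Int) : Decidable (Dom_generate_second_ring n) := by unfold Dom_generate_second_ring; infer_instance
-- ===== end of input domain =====

-- B replaces A's accumulated modular index + positional pop by physically rotating the
-- shrinking ring so each survivor is taken from the front (alternative decomposition, same cost).

def pvAlphabet : List String :=
  ["A","B","C","D","E","F","G","H","I","J","K","L","M",
   "N","O","P","Q","R","S","T","U","V","W","X","Y","Z"]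

-- ===== PORT A =====
-- while len(alphabet) > 0: index += n-1; index %= len(alphabet); result.append(alphabet[index]); alphabet.pop(index)
def pvLoopA (n : Int) (alphabet result : List String) (index : Int) : List String :=
  if _h : 0 < alphabet.length then
    match _h1 : PySem.List.pyGet? alphabet (PySem.Int.mod (index + (n - 1)) (alphabet.length : Int)),
          _h2 : PySem.List.pop? alphabet (PySem.Int.mod (index + (n - 1)) (alphabet.length : Int)) with
    | some x, some (_, rest) =>
        pvLoopA n rest (result ++ [x]) (PySem.Int.mod (index + (n - 1)) (alphabet.length : Int))
    | _, _ => result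
  else result
termination_by alphabet.length
decreasing_by
  have := PySem.List.length_of_pop?_eq_some alphabet _h2
  simp at this; omega

def generate_second_ring (n : Int) : List String :=
  pvLoopA n pvAlphabet [] 0

-- ===== PORT B =====
-- while ring: k = (n-1) % len(ring); ring = ring[k:] + ring[:k]; result.append(ring[0]); ring = ring[1:]
-- (the slices ring[k:], ring[:k], ring[1:] with 0 ≤ k are exactly drop/take: PySem.List.slice_from/slice_to;
--  the match on the rotated ring is ring[0] followed by ring[1:])
def pvLoopB (n : Int) (ring result : List String) : List String :=
  if 0 < ring.length then
    match _h : ring.drop ((PySem.Int.mod (n - 1) (ring.length : Int)).toNat)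
          ++ ring.take ((PySem.Int.mod (n - 1) (ring.length : Int)).toNat) with
    | [] => result
    | x :: rest => pvLoopB n rest (result ++ [x])
  else result
termination_by ring.length
decreasing_by
  have := congrArg List.length _h
  simp at this; omega

def generate_second_ring_alt (n : Int) : List String :=
  pvLoopB n pvAlphabet []

-- ===== PRECONDITION & SPEC =====
def Spec_generate_second_ring (n : Int) (out : List String) : Prop := out = generate_second_ring_alt n
instance (n : Int) (out : List String) : Decidable (Spec_generate_second_ring n out) := by unfold Spec_generate_second_ring; infer_instance

-- ===== CLAIM (what is proved, stated in full; the proofs are below) =====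
def Claim_equal_generate_second_ring : Prop := ∀ (n : Int), Dom_generate_second_ring n → Spec_generate_second_ring n (generate_second_ring n)

-- ===== LEMMAS AND PROOFS =====

-- Invariant: A's state (list l, pending index j) corresponds to B's state (the ring l rotated by j).
theorem pvLoop_eq (n : Int) : ∀ (L : Nat) (l : List String), l.length = L →
    ∀ (result : List String) (j : Nat), j ≤ L →
    pvLoopA n l result (j : Int) = pvLoopB n (l.rotate j) result := by
  intro L
  induction L with
  | zero =>
    intro l hl result j hj
    have hl0 : l = [] := List.length_eq_zero_iff.mp hl
    subst hl0
    rw [pvLoopA, pvLoopB]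
    simp
  | succ m ih =>
    intro l hl result j hj
    have hpos : 0 < l.length := by omega
    have hLpos : (0:Int) < (l.length : Int) := by exact_mod_cast hpos
    -- the new index on A's side, as a natural number i < len
    obtain ⟨i, hilt, hm⟩ : ∃ i : Nat, i < l.length ∧
        PySem.Int.mod ((j:Int) + (n - 1)) (l.length : Int) = (i : Int) := by
      refine ⟨(PySem.Int.mod ((j:Int) + (n - 1)) (l.length : Int)).toNat, ?_, ?_⟩
      · rw [PySem.Int.mod_eq_emod_of_pos hLpos]
        have h1 := Int.emod_nonneg ((j:Int) + (n - 1)) (by omega : (l.length:Int) ≠ 0)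
        have h2 := Int.emod_lt_of_pos ((j:Int) + (n - 1)) hLpos
        omega
      · rw [PySem.Int.mod_eq_emod_of_pos hLpos]
        exact (Int.toNat_of_nonneg (Int.emod_nonneg _ (by omega))).symm
    -- the rotation amount on B's side
    obtain ⟨k, hklt, hkm⟩ : ∃ k : Nat, k < l.length ∧
        (PySem.Int.mod (n - 1) (l.length : Int)).toNat = k := by
      refine ⟨_, ?_, rfl⟩
      rw [PySem.Int.mod_eq_emod_of_pos hLpos]
      have h1 := Int.emod_nonneg (n - 1) (by omega : (l.length:Int) ≠ 0)
      have h2 := Int.emod_lt_of_pos (n - 1) hLpos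
      omega
    -- the two rotations land on the same element: (j + k) % len = i
    have hjk : (j + k) % l.length = i := by
      have hcast : (((j + k) % l.length : Nat) : Int)
          = PySem.Int.mod ((j:Int) + (n - 1)) (l.length : Int) := by
        rw [PySem.Int.mod_eq_emod_of_pos hLpos]
        have hkc : (k : Int) = (n - 1) % (l.length : Int) := by
          rw [← hkm, PySem.Int.mod_eq_emod_of_pos hLpos]
          exact Int.toNat_of_nonneg (Int.emod_nonneg _ (by omega))
        push_cast
        rw [hkc, Int.add_emod ((j:Int)) (n-1), Int.add_emod ((j:Int)) ((n-1) % _),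
          Int.emod_emod_of_dvd _ dvd_rfl]
      rw [hm] at hcast
      omega
    -- one step of A
    have hget : PySem.List.pyGet? l (PySem.Int.mod ((j:Int) + (n - 1)) (l.length : Int))
        = some (l[i]'hilt) := by
      rw [hm]
      simpa using PySem.List.pyGet?_eq_some_getElem l (i := (i:Int)) (by omega)
        (by exact_mod_cast hilt)
    have hpop : PySem.List.pop? l (PySem.Int.mod ((j:Int) + (n - 1)) (l.length : Int))
        = some ((l[i]'hilt), l.eraseIdx i) := by
      rw [hm]; exact PySem.List.pop?_natCast l i hilt
    -- the rotated ring starts with that same element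
    have hring : (l.rotate j).drop ((PySem.Int.mod (n - 1) ((l.rotate j).length : Int)).toNat)
          ++ (l.rotate j).take ((PySem.Int.mod (n - 1) ((l.rotate j).length : Int)).toNat)
        = (l[i]'hilt) :: (l.drop (i+1) ++ l.take i) := by
      rw [List.length_rotate, hkm,
        ← List.rotate_eq_drop_append_take (by rw [List.length_rotate]; omega),
        List.rotate_rotate, ← List.rotate_mod, hjk,
        List.rotate_eq_drop_append_take (le_of_lt hilt),
        ← List.cons_append, List.getElem_cons_drop hilt]
    -- the recursive calls agree by the induction hypothesis
    have hlen : (l.take i).length = i := List.length_take_of_le (le_of_lt hilt)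
    have hrest : l.drop (i+1) ++ l.take i = (l.eraseIdx i).rotate i := by
      rw [List.eraseIdx_eq_take_drop_succ,
        List.rotate_eq_drop_append_take (by rw [List.length_append, hlen, List.length_drop]; omega),
        List.drop_append_of_le_length (le_of_eq hlen.symm),
        List.take_append_of_le_length (le_of_eq hlen.symm)]
      simp [List.take_take]
    have hih := ih (l.eraseIdx i) (by rw [List.length_eraseIdx_of_lt hilt, hl]; omega)
      (result ++ [(l[i]'hilt)]) i (by omega)
    -- unfold one step of each loop and close with the above
    rw [pvLoopA, dif_pos hpos, pvLoopB, if_pos (by rw [List.length_rotate]; exact hpos)]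
    split
    next x fst rest h1 h2 =>
      rw [hget] at h1; rw [hpop] at h2
      obtain ⟨rfl⟩ := Option.some.inj h1
      obtain ⟨rfl, rfl⟩ := Prod.mk.injEq .. |>.mp (Option.some.inj h2)
      split
      next h =>
        rw [hring] at h; exact absurd h (by simp)
      next y rest2 h =>
        rw [hring] at h
        obtain ⟨rfl, rfl⟩ := List.cons.injEq .. |>.mp h
        rw [hm, hrest]
        exact hih
    next hno =>
      exact absurd (hno _ _ _ hget hpop) (fun f => f)

-- ===== VERDICT (by name: the statement is the Claim_ definition above) =====
theorem generate_second_ring_spec : Claim_equal_generate_second_ring := by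
  intro n _
  unfold Spec_generate_second_ring generate_second_ring generate_second_ring_alt
  have h := pvLoop_eq n pvAlphabet.length pvAlphabet rfl [] 0 (Nat.zero_le _)
  simpa using h
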